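-- pv_equiv track=rewrite | github.com/MsClaudz/SSD-Simulator | SimulateIO.py | garbage_collect
-- ===== SOURCE A (Python) =====
-- def garbage_collect(partition, pages_per_erase_block):
--     '''(list of lists of int, int) -> (list of lists of int, int)
--
--     Takes a partition. Writes all valid data from erase blocks into a new
--     partition, counting the number of writes the occurred to move data from
--     erase blocks containing invalid pages. Splits new partition into correct
--     number of erase blocks and returns a tuple of (new_partition, GC_writes)
--
--     e.g.
--     >>>garbage_collect([[-12, 15, -14], [-13, 12, 14], [22, 24, 25], [13]], 3)
--     ([[22, 24, 25], [13, 15, 12], [14], []], 3)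
--     '''
--     GC_writes = 0
--
--     # Create temporary list
--     temp = []
--
--     for erase_block in partition:
--         # Write full blocks with no invalid pages to temp
--         # And Write partial blocks with no invalid pages to temp
--         # Do not increment GC_writes
--         if all(i > 0 for i in erase_block) and \
--         len(erase_block) <= pages_per_erase_block:
--             temp.extend(erase_block)
--
--         # Write blocks with one or more invalid pages to temp
--         # Increment GC_writes
--         #if not all(i > 0 for i in erase_block):
--         else:
--             for page in erase_block:
--                 if page > 0:
--                     temp.append(page)
--                     GC_writes += 1
--
--     # Create a new_partition variable
--     new_partition = []
--
--     # Split temp into erase block-sized chunks and store them in new_partition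
--     for i in range(0, len(temp), pages_per_erase_block):
--         new_partition.append(temp[i:i+pages_per_erase_block])
--
--     # Add empty erase blocks to new partition to bring it up to original size
--     i = len(partition)
--     while len(new_partition) < i:
--         new_partition.append([])
--
--     # return (new_partition, GC_writes)
--     return (new_partition, GC_writes)
-- ===== SOURCE B (Python) =====
-- def garbage_collect(partition, pages_per_erase_block):
--     # Online single pass: stream each valid page straight into a fixed-size
--     # current block, flushing it into new_partition whenever it fills, and
--     # count the write as it happens unless the source block moves for free.
--     new_partition = []
--     current = []
--     GC_writes = 0
--     for erase_block in partition:
--         free = len(erase_block) <= pages_per_erase_block and \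
--             all(p > 0 for p in erase_block)
--         for page in erase_block:
--             if page > 0:
--                 current.append(page)
--                 if not free:
--                     GC_writes += 1
--                 if len(current) == pages_per_erase_block:
--                     new_partition.append(current)
--                     current = []
--     if current:
--         new_partition.append(current)
--     new_partition.extend([] for _ in range(len(partition) - len(new_partition)))
--     return (new_partition, GC_writes)
-- ===== Notes on version B (the rewrite author's own statement) =====
-- stated objective: alternative
-- what changed: A stages the work: accumulate all valid pages into a temp list, then re-chunk temp by index slicing over range(), then pad with a while loop; B never materialises temp: one streaming pass deposits each valid page into a current block that is flushed online the moment it fills, counting each non-free write as it happens, with a comprehension doing the padding.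
-- outside the precondition, e.g. on garbage_collect([[1]], -1): A returns ([[]], 1), B returns ([[1]], 1); on garbage_collect([[2, 3]], 0): A raises ValueError, B returns ([[2, 3]], 2)
import Mathlib
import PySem

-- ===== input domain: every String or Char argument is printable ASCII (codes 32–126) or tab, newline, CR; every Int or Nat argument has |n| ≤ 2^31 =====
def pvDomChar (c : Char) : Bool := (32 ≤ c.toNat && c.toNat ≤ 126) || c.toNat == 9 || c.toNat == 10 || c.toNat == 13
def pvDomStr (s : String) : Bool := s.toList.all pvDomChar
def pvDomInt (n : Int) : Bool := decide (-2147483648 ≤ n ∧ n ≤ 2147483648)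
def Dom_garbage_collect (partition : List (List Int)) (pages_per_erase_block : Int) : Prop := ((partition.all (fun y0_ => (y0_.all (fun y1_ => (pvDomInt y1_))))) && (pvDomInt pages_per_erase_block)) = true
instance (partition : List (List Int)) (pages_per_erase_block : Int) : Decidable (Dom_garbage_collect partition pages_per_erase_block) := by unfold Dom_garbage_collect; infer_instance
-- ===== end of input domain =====

-- B replaces A's staged passes (accumulate temp, re-chunk it by slicing, pad by a while loop) with a
-- single streaming pass that flushes a current block online whenever it fills (objective: alternative
-- decomposition, same cost); proved equal for every positive pages_per_erase_block.

-- ===== PORT A =====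
-- the 'while len(new_partition) < i: new_partition.append([])' loop of A
def pvPadLoop (new_partition : List (List Int)) (i : Nat) : List (List Int) :=
  if new_partition.length < i then pvPadLoop (new_partition ++ [[]]) i else new_partition
termination_by i - new_partition.length
decreasing_by simp_all; omega

def garbage_collect (partition : List (List Int)) (pages_per_erase_block : Int) : List (List Int) × Int :=
  -- GC_writes = 0; temp = []; for erase_block in partition: ...
  let st := partition.foldl (fun (st : List Int × Int) erase_block =>
      if erase_block.all (fun i => decide (0 < i)) && decide ((erase_block.length : Int) ≤ pages_per_erase_block) then
        (st.1 ++ erase_block, st.2)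
      else
        erase_block.foldl (fun st page => if 0 < page then (st.1 ++ [page], st.2 + 1) else st) st)
    ([], 0)
  let temp := st.1
  let GC_writes := st.2
  -- for i in range(0, len(temp), pages_per_erase_block): new_partition.append(temp[i:i+ppeb])
  let new_partition := (PySem.List.pyRange 0 (temp.length : Int) pages_per_erase_block).foldl
      (fun acc i => acc ++ [PySem.List.slice temp (some i) (some (i + pages_per_erase_block))]) []
  -- i = len(partition); while len(new_partition) < i: new_partition.append([])
  let new_partition := pvPadLoop new_partition partition.length
  (new_partition, GC_writes)

-- ===== PORT B =====
def garbage_collect_alt (partition : List (List Int)) (pages_per_erase_block : Int) : List (List Int) × Int :=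
  -- state = (new_partition, current, GC_writes); for erase_block in partition: ...
  let st := partition.foldl (fun (st : List (List Int) × List Int × Int) erase_block =>
      -- free = len(erase_block) <= pages_per_erase_block and all(p > 0 for p in erase_block)
      let free := decide ((erase_block.length : Int) ≤ pages_per_erase_block) && erase_block.all (fun p => decide (0 < p))
      erase_block.foldl (fun st page =>
        if 0 < page then
          -- current.append(page); if not free: GC_writes += 1; flush when current fills
          let current := st.2.1 ++ [page]
          let g := if free then st.2.2 else st.2.2 + 1
          if ((current.length : Int) == pages_per_erase_block) then (st.1 ++ [current], ([] : List Int), g)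
          else (st.1, current, g)
        else st) st)
    ([], [], 0)
  -- if current: new_partition.append(current)
  let new_partition := if st.2.1.isEmpty then st.1 else st.1 ++ [st.2.1]
  -- new_partition.extend([] for _ in range(len(partition) - len(new_partition)))
  let new_partition := new_partition ++ List.replicate (partition.length - new_partition.length) ([] : List Int)
  (new_partition, st.2.2)

-- ===== PRECONDITION & SPEC =====
-- Pre_ excludes nonpositive block sizes: at pages_per_erase_block == 0 A's range() raises ValueError,
-- and for a negative size neither behaviour is specified for this corner — A's slicing yields no chunks
-- (every valid page vanishes) while B's stream never flushes (one oversized block); both are accidents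
-- of a meaningless parameter, so the claim covers the natural domain 0 < pages_per_erase_block only.
def Pre_garbage_collect (partition : List (List Int)) (pages_per_erase_block : Int) : Prop :=
  0 < pages_per_erase_block
instance (partition : List (List Int)) (pages_per_erase_block : Int) : Decidable (Pre_garbage_collect partition pages_per_erase_block) := by unfold Pre_garbage_collect; infer_instance
def pvWitness_garbage_collect : List (List Int) × Int := ([[-12, 15, -14], [-13, 12, 14], [22, 24, 25], [13]], 3)

def Spec_garbage_collect (partition : List (List Int)) (pages_per_erase_block : Int) (out : List (List Int) × Int) : Prop := out = garbage_collect_alt partition pages_per_erase_block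
instance (partition : List (List Int)) (pages_per_erase_block : Int) (out : List (List Int) × Int) : Decidable (Spec_garbage_collect partition pages_per_erase_block out) := by unfold Spec_garbage_collect; infer_instance

-- ===== CLAIM (what is proved, stated in full; the proofs are below) =====
def Claim_equal_garbage_collect : Prop := ∀ (partition : List (List Int)) (pages_per_erase_block : Int), Dom_garbage_collect partition pages_per_erase_block → Pre_garbage_collect partition pages_per_erase_block → Spec_garbage_collect partition pages_per_erase_block (garbage_collect partition pages_per_erase_block)

-- ===== LEMMAS AND PROOFS =====

-- the positive pages of one block / of the whole partition
def pvPos (eb : List Int) : List Int := eb.filter (fun p => decide (0 < p))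

-- the (new_partition, current) step of B's streaming pass, stripped of the counter
def pvChunkStep (ppeb : Int) (st : List (List Int) × List Int) (page : Int) : List (List Int) × List Int :=
  let cur := st.2 ++ [page]
  if ((cur.length : Int) == ppeb) then (st.1 ++ [cur], []) else (st.1, cur)

-- reference chunking: split a list into blocks of size k+1 (last one possibly short)
def pvChunks (k : Nat) : List Int → List (List Int)
  | [] => []
  | x :: xs => ((x :: xs).take (k + 1)) :: pvChunks k ((x :: xs).drop (k + 1))
termination_by l => l.length
decreasing_by simp

lemma pvChunks_ne (k : Nat) (l : List Int) (h : l ≠ []) :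
    pvChunks k l = l.take (k + 1) :: pvChunks k (l.drop (k + 1)) := by
  cases l with
  | nil => exact absurd rfl h
  | cons x xs => simp only [pvChunks]

-- A's inner else-loop appends the positive pages and counts them
lemma pvInnerLoop (eb : List Int) (t : List Int) (g : Int) :
    eb.foldl (fun st page => if 0 < page then (st.1 ++ [page], st.2 + 1) else st) (t, g)
      = (t ++ pvPos eb, g + ((pvPos eb).length : Int)) := by
  induction eb generalizing t g with
  | nil => simp [pvPos]
  | cons x xs ih =>
    by_cases hx : 0 < x
    · have hpos : pvPos (x :: xs) = x :: pvPos xs := by simp [pvPos, hx]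
      simp only [List.foldl_cons, if_pos hx, ih, hpos]
      simp [List.append_assoc]
      try push_cast
      try ring
    · have hpos : pvPos (x :: xs) = pvPos xs := by simp [pvPos, hx]
      simp only [List.foldl_cons, if_neg hx, ih, hpos]

-- A's main loop: temp = all positive pages in order; GC counts the pages of non-free blocks
lemma pvOuterLoop (ppeb : Int) (l : List (List Int)) (t : List Int) (g : Int) :
    l.foldl (fun (st : List Int × Int) erase_block =>
      if erase_block.all (fun i => decide (0 < i)) && decide ((erase_block.length : Int) ≤ ppeb) then
        (st.1 ++ erase_block, st.2)
      else
        erase_block.foldl (fun st page => if 0 < page then (st.1 ++ [page], st.2 + 1) else st) st) (t, g)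
      = (t ++ l.flatMap pvPos,
         g + (l.map (fun eb =>
              if eb.all (fun i => decide (0 < i)) && decide ((eb.length : Int) ≤ ppeb) then (0 : Int)
              else ((pvPos eb).length : Int))).sum) := by
  induction l generalizing t g with
  | nil => simp
  | cons eb l ih =>
    by_cases hc : (eb.all (fun i => decide (0 < i)) && decide ((eb.length : Int) ≤ ppeb)) = true
    · have hall : ∀ p ∈ eb, 0 < p := by
        intro p hp
        have := (List.all_eq_true.mp (Bool.and_elim_left hc)) p hp
        simpa using this
      have hfe : pvPos eb = eb :=
        List.filter_eq_self.mpr (by intro p hp; simpa using hall p hp)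
      simp only [List.foldl_cons, List.map_cons, List.sum_cons, if_pos hc, ih]
      simp [hfe]
    · simp only [List.foldl_cons, pvInnerLoop, List.map_cons, List.sum_cons, if_neg hc, ih]
      simp
      ring

-- A's while-padding equals appending the right number of empty blocks
lemma pvPadLoop_eq (k : Nat) : ∀ (np : List (List Int)) (n : Nat), n - np.length = k →
    pvPadLoop np n = np ++ List.replicate k ([] : List Int) := by
  induction k with
  | zero =>
    intro np n h
    rw [pvPadLoop]
    simp [Nat.not_lt.mpr (Nat.le_of_sub_eq_zero h)]
  | succ k ih =>
    intro np n h
    have hlt : np.length < n := by omega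
    rw [pvPadLoop, if_pos hlt, ih (np ++ [[]]) n (by simp; omega)]
    simp [List.replicate_succ]

-- pyRange with a positive step unrolls one element at a time
lemma pvPyRange_pos_nil (a b s : Int) (hs : 0 < s) (h : b ≤ a) :
    PySem.List.pyRange a b s = [] := by
  rw [PySem.List.pyRange_of_pos _ _ hs, if_neg (by omega)]
  simp

lemma pvPyRange_pos_cons (a b s : Int) (hs : 0 < s) (h : a < b) :
    PySem.List.pyRange a b s = a :: PySem.List.pyRange (a + s) b s := by
  rw [PySem.List.pyRange_of_pos _ _ hs, PySem.List.pyRange_of_pos _ _ hs, if_pos h]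
  have hnum : b - a + s - 1 = (b - (a + s) + s - 1) + 1 * s := by ring
  have hstep : (b - a + s - 1) / s = (b - (a + s) + s - 1) / s + 1 := by
    rw [hnum, Int.add_mul_ediv_right _ _ (by omega : s ≠ 0)]
  by_cases hb : a + s < b
  · have hnn : 0 ≤ (b - (a + s) + s - 1) / s :=
      Int.ediv_nonneg (by omega) (by omega)
    rw [if_pos hb, hstep]
    have htn : ((b - (a + s) + s - 1) / s + 1).toNat = ((b - (a + s) + s - 1) / s).toNat + 1 := by
      omega
    rw [htn, List.range_succ_eq_map]
    simp [List.map_map]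
    intro n _
    ring
  · have hz : (b - (a + s) + s - 1) / s = 0 :=
      Int.ediv_eq_zero_of_lt (by omega) (by omega)
    rw [if_neg hb, hstep, hz]
    simp

-- A's slice-chunking over range(0, len(temp), k+1) is the reference chunking
lemma pvChunkA (k : Nat) (temp : List Int) : ∀ (m j : Nat), temp.length - j ≤ m →
    (PySem.List.pyRange (j : Int) (temp.length : Int) ((k : Int) + 1)).map
        (fun i => PySem.List.slice temp (some i) (some (i + ((k : Int) + 1))))
      = pvChunks k (temp.drop j) := by
  intro m
  induction m with
  | zero =>
    intro j hj
    have hle : temp.length ≤ j := by omega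
    rw [pvPyRange_pos_nil _ _ _ (by omega) (by exact_mod_cast hle)]
    rw [List.drop_eq_nil_of_le hle]
    simp [pvChunks]

  | succ m ih =>
    intro j hj
    by_cases hlt : j < temp.length
    · rw [pvPyRange_pos_cons _ _ _ (by omega) (by exact_mod_cast hlt)]
      rw [List.map_cons]
      have hcast : ((j : Int) + ((k : Int) + 1)) = ((j + (k + 1) : Nat) : Int) := by push_cast; ring
      rw [hcast, ih (j + (k + 1)) (by omega)]
      have hsl : PySem.List.slice temp (some (j : Int)) (some ((j + (k + 1) : Nat) : Int))
          = (temp.drop j).take (k + 1) := by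
        have h := PySem.List.slice_natCast_add temp j (k + 1)
        push_cast at h ⊢
        exact h
      rw [hsl, pvChunks_ne k (temp.drop j) (by simp; omega), List.drop_drop]
    · rw [pvPyRange_pos_nil _ _ _ (by omega) (by exact_mod_cast (by omega : temp.length ≤ j))]
      rw [List.drop_eq_nil_of_le (by omega)]
      simp [pvChunks]

-- B's streaming pass, stripped of the counter, produces the reference chunking
lemma pvStream (k : Nat) : ∀ (temp : List Int) (np : List (List Int)) (cur : List Int),
    cur.length ≤ k →
    ((if (temp.foldl (pvChunkStep ((k : Int) + 1)) (np, cur)).2.isEmpty then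
        (temp.foldl (pvChunkStep ((k : Int) + 1)) (np, cur)).1
      else (temp.foldl (pvChunkStep ((k : Int) + 1)) (np, cur)).1
            ++ [(temp.foldl (pvChunkStep ((k : Int) + 1)) (np, cur)).2])
        = np ++ pvChunks k (cur ++ temp))
      ∧ (temp.foldl (pvChunkStep ((k : Int) + 1)) (np, cur)).2.length ≤ k := by
  intro temp
  induction temp with
  | nil =>
    intro np cur hcur
    simp only [List.foldl_nil, List.append_nil]
    refine ⟨?_, hcur⟩
    cases hc : cur.isEmpty with
    | false =>
      have hne : cur ≠ [] := by simpa using hc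
      rw [pvChunks_ne k cur hne, List.take_of_length_le (by omega),
          List.drop_eq_nil_of_le (by omega)]
      simp [pvChunks]
    | true =>
      have he : cur = [] := by simpa using hc
      simp [he, pvChunks]
  | cons x xs ih =>
    intro np cur hcur
    simp only [List.foldl_cons]
    by_cases hl : (((cur ++ [x]).length : Int) == ((k : Int) + 1)) = true
    · have hlen : cur.length = k := by
        have hEq := eq_of_beq hl
        simp at hEq
        omega
      have hstep : pvChunkStep ((k : Int) + 1) (np, cur) x = (np ++ [cur ++ [x]], []) := by
        simp [pvChunkStep]
        omega
      rw [hstep]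
      have h2 := ih (np ++ [cur ++ [x]]) [] (by simp)
      refine ⟨?_, h2.2⟩
      rw [h2.1]
      have hfull : (cur ++ [x]).length = k + 1 := by simp <;> omega
      have hsplit : cur ++ x :: xs = (cur ++ [x]) ++ xs := by simp
      rw [hsplit, pvChunks_ne k ((cur ++ [x]) ++ xs) (by simp),
          List.take_append_of_le_length (by simp <;> omega), List.take_of_length_le (by simp <;> omega),
          List.drop_append_of_le_length (by simp <;> omega), List.drop_eq_nil_of_le (by simp <;> omega)]
      simp
    · have hlen : (cur ++ [x]).length ≤ k := by
        have hne : ((cur ++ [x]).length : Int) ≠ ((k : Int) + 1) := by simpa using hl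
        simp at hne ⊢
        omega
      have hlen' : cur.length + 1 ≤ k := by simpa using hlen
      have hstep : pvChunkStep ((k : Int) + 1) (np, cur) x = (np, cur ++ [x]) := by
        simp [pvChunkStep]
        omega
      rw [hstep]
      have h2 := ih np (cur ++ [x]) hlen
      refine ⟨?_, h2.2⟩
      rw [h2.1]
      simp

-- B's inner page loop, its counter split off from the chunking state
lemma pvBInner (ppeb : Int) (free : Bool) (eb : List Int) (np : List (List Int)) (cur : List Int) (g : Int) :
    eb.foldl (fun (st : List (List Int) × List Int × Int) page =>
        if 0 < page then
          let current := st.2.1 ++ [page]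
          let g' := if free then st.2.2 else st.2.2 + 1
          if ((current.length : Int) == ppeb) then (st.1 ++ [current], ([] : List Int), g')
          else (st.1, current, g')
        else st) (np, cur, g)
      = (((pvPos eb).foldl (pvChunkStep ppeb) (np, cur)).1,
         ((pvPos eb).foldl (pvChunkStep ppeb) (np, cur)).2,
         g + (if free then 0 else ((pvPos eb).length : Int))) := by
  induction eb generalizing np cur g with
  | nil => simp [pvPos]
  | cons x xs ih =>
    by_cases hx : 0 < x
    · have hpos : pvPos (x :: xs) = x :: pvPos xs := by simp [pvPos, hx]
      rw [hpos]
      simp only [List.foldl_cons, if_pos hx]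
      by_cases hl : (((cur ++ [x]).length : Int) == ppeb) = true
      · simp only [hl, if_true]
        rw [ih]
        have hstep : pvChunkStep ppeb (np, cur) x = (np ++ [cur ++ [x]], []) := by
          have hEq := eq_of_beq hl
          simp [pvChunkStep, hl]
          simpa using hEq
        rw [hstep]
        cases free <;> simp <;> ring
      · simp only [hl]
        simp only [Bool.false_eq_true, if_false]
        rw [ih]
        have hstep : pvChunkStep ppeb (np, cur) x = (np, cur ++ [x]) := by
          have hne : ¬(((cur ++ [x]).length : Int) = ppeb) := by simpa using hl
          simp [pvChunkStep]
          simpa using hne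
        rw [hstep]
        cases free <;> simp <;> ring
    · have hpos : pvPos (x :: xs) = pvPos xs := by simp [pvPos, hx]
      rw [hpos]
      simp only [List.foldl_cons, if_neg hx]
      exact ih np cur g

-- B's outer loop: chunking state folds over the flattened positive pages, counter sums per block
lemma pvBOuter (ppeb : Int) (l : List (List Int)) (np : List (List Int)) (cur : List Int) (g : Int) :
    l.foldl (fun (st : List (List Int) × List Int × Int) erase_block =>
        let free := decide ((erase_block.length : Int) ≤ ppeb) && erase_block.all (fun p => decide (0 < p))
        erase_block.foldl (fun st page =>
          if 0 < page then
            let current := st.2.1 ++ [page]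
            let g' := if free then st.2.2 else st.2.2 + 1
            if ((current.length : Int) == ppeb) then (st.1 ++ [current], ([] : List Int), g')
            else (st.1, current, g')
          else st) st) (np, cur, g)
      = (((l.flatMap pvPos).foldl (pvChunkStep ppeb) (np, cur)).1,
         ((l.flatMap pvPos).foldl (pvChunkStep ppeb) (np, cur)).2,
         g + (l.map (fun eb =>
              if decide ((eb.length : Int) ≤ ppeb) && eb.all (fun p => decide (0 < p)) then (0 : Int)
              else ((pvPos eb).length : Int))).sum) := by
  induction l generalizing np cur g with
  | nil => simp
  | cons eb l ih =>
    simp only [List.foldl_cons, List.flatMap_cons, List.map_cons, List.sum_cons]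
    rw [pvBInner, ih, List.foldl_append]
    refine Prod.ext rfl (Prod.ext rfl ?_)
    ring

-- the two per-block counters agree (A tests all-positive first, B tests the length first)
lemma pvCountEq (ppeb : Int) (l : List (List Int)) :
    (l.map (fun eb =>
        if eb.all (fun i => decide (0 < i)) && decide ((eb.length : Int) ≤ ppeb) then (0 : Int)
        else ((pvPos eb).length : Int))).sum
      = (l.map (fun eb =>
        if decide ((eb.length : Int) ≤ ppeb) && eb.all (fun p => decide (0 < p)) then (0 : Int)
        else ((pvPos eb).length : Int))).sum := by
  congr 1
  apply List.map_congr_left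
  intro eb _
  rw [Bool.and_comm]

theorem garbage_collect_spec_aux (partition : List (List Int)) (ppeb : Int) (hp : 0 < ppeb) :
    garbage_collect partition ppeb = garbage_collect_alt partition ppeb := by
  obtain ⟨k, hk⟩ : ∃ k : Nat, ppeb = (k : Int) + 1 :=
    ⟨(ppeb - 1).toNat, by omega⟩
  subst hk
  simp only [garbage_collect, garbage_collect_alt]
  rw [pvOuterLoop, pvBOuter, PySem.List.foldl_append_singleton_eq_map]
  simp only [List.nil_append, zero_add]
  have hchunkA := pvChunkA k (partition.flatMap pvPos) (partition.flatMap pvPos).length 0 (by omega)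
  simp only [Nat.cast_zero, List.drop_zero] at hchunkA
  have hstream := pvStream k (partition.flatMap pvPos) [] [] (by simp)
  simp only [List.nil_append] at hstream
  rw [hchunkA, ← hstream.1]
  rw [pvPadLoop_eq _ _ _ rfl]
  exact Prod.ext rfl (pvCountEq _ _)

-- ===== VERDICT (by name: the statement is the Claim_ definition above) =====
theorem garbage_collect_spec : Claim_equal_garbage_collect := by
  intro partition ppeb _ hpre
  unfold Spec_garbage_collect
  exact garbage_collect_spec_aux partition ppeb hpre
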